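-- pv_equiv track=rewrite | github.com/MariiaNikitash/Data-Structures-w-Python | CodePath_TIP102/stacks_queues/standart2.py | final_supply_costs
-- ===== SOURCE A (Python) =====
-- def final_supply_costs(costs):
--     stack = []
--     res = costs[:] # copy of costs
--     for i in range(len(costs)):
--         while stack and costs[stack[-1]] >= costs[i]:
--             j = stack.pop()
--             res[j] -= costs[i]
--         stack.append(i)
--     return res
-- ===== SOURCE B (Python) =====
-- def final_supply_costs(costs):
--     return [c - next((d for d in costs[j + 1:] if d <= c), 0)
--             for j, c in enumerate(costs)]
-- ===== Notes on version B (the rewrite author's own statement) =====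
-- stated objective: simpler
-- what changed: Replaces the monotonic-stack single pass with a direct per-element definition: each output is costs[j] minus the first later element <= costs[j] (or 0), built as one comprehension with a forward scan of the suffix.
import Mathlib
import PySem

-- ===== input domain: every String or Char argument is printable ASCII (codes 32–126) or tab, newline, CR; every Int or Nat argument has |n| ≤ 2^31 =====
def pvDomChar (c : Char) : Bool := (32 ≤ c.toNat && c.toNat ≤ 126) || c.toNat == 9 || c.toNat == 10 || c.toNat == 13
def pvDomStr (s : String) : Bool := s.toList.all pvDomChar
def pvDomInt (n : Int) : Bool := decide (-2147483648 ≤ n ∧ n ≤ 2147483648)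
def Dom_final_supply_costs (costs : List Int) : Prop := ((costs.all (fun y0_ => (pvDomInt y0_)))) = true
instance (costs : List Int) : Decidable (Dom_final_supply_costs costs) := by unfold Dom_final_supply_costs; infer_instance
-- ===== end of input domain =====

-- B replaces A's monotonic-stack pass by a direct per-element forward scan of the
-- suffix (first later element ≤ costs[j] is subtracted); objective: simpler, not faster.

-- ===== PORT A =====
-- the inner `while stack and costs[stack[-1]] >= costs[i]` loop (head of the list = top of the stack)
def popLoop (costs : List Int) (x : Int) : List Nat → List Int → List Nat × List Int
  | [], res => ([], res)
  | j :: rest, res =>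
    if x ≤ costs.getD j 0 then
      popLoop costs x rest (res.set j (res.getD j 0 - x))
    else (j :: rest, res)

-- one iteration of the `for i in range(len(costs))` body: pop, then append i
def stepA (costs : List Int) (st : List Nat × List Int) (i : Nat) : List Nat × List Int :=
  (i :: (popLoop costs (costs.getD i 0) st.1 st.2).1,
   (popLoop costs (costs.getD i 0) st.1 st.2).2)

def final_supply_costs (costs : List Int) : List Int :=
  ((List.range costs.length).foldl (stepA costs) ([], costs)).2

-- ===== PORT B =====
-- `next((d for d in suffix if d <= c), 0)`: first element ≤ c, default 0
def nextLE (c : Int) : List Int → Int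
  | [] => 0
  | d :: t => if d ≤ c then d else nextLE c t

def final_supply_costs_alt (costs : List Int) : List Int :=
  (PySem.List.enumerate costs).map
    (fun p => p.2 - nextLE p.2 (PySem.List.slice costs (some (p.1 + 1)) none))

-- ===== PRECONDITION & SPEC =====
def Spec_final_supply_costs (costs : List Int) (out : List Int) : Prop := out = final_supply_costs_alt costs
instance (costs : List Int) (out : List Int) : Decidable (Spec_final_supply_costs costs out) := by unfold Spec_final_supply_costs; infer_instance

-- ===== CLAIM (what is proved, stated in full; the proofs are below) =====
def Claim_equal_final_supply_costs : Prop := ∀ (costs : List Int), Dom_final_supply_costs costs → Spec_final_supply_costs costs (final_supply_costs costs)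

-- ===== LEMMAS AND PROOFS =====

-- elements of costs at positions (j, i) (exclusive), i.e. what A has scanned past j so far
def seg (costs : List Int) (i j : Nat) : List Int := (costs.take i).drop (j+1)

-- loop invariant of A after processing indices 0..i-1
def InvA (costs : List Int) (i : Nat) (stack : List Nat) (res : List Int) : Prop :=
  i ≤ costs.length ∧
  res.length = costs.length ∧
  stack.Pairwise (fun a b => b < a) ∧
  (∀ j, j ∈ stack ↔ (j < i ∧ ∀ d ∈ seg costs i j, costs.getD j 0 < d)) ∧
  (∀ j, j < costs.length → res.getD j 0 = costs.getD j 0 - nextLE (costs.getD j 0) (seg costs i j))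

lemma seg_nil (costs : List Int) (i j : Nat) (h : i ≤ j + 1) : seg costs i j = [] := by
  unfold seg
  apply List.drop_eq_nil_of_le
  have := List.length_take_le i costs
  omega

lemma seg_elem (costs : List Int) (i j k : Nat) (hjk : j < k) (hki : k < i)
    (hi : i ≤ costs.length) : costs.getD k 0 ∈ seg costs i j := by
  unfold seg
  have hlen : ((costs.take i).drop (j+1)).length = i - (j+1) := by
    simp [List.length_take]; omega
  have hk' : k - (j+1) < ((costs.take i).drop (j+1)).length := by omega
  have : ((costs.take i).drop (j+1))[k - (j+1)] = costs.getD k 0 := by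
    rw [List.getElem_drop, List.getElem_take]
    rw [List.getD_eq_getElem costs 0 (by omega)]
    congr 1; omega
  rw [← this]
  exact List.getElem_mem hk'

lemma seg_succ (costs : List Int) (i j : Nat) (hij : j < i) (hi : i < costs.length) :
    seg costs (i+1) j = seg costs i j ++ [costs.getD i 0] := by
  unfold seg
  rw [List.take_add_one, List.getElem?_eq_getElem hi]
  rw [show (some costs[i]).toList = [costs[i]] from rfl]
  rw [List.drop_append_of_le_length (by simp [List.length_take]; omega)]
  rw [List.getD_eq_getElem costs 0 hi]

lemma nextLE_eq_zero (c : Int) (l : List Int) (h : ∀ d ∈ l, c < d) : nextLE c l = 0 := by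
  induction l with
  | nil => rfl
  | cons d t ih =>
    have hd := h d (List.mem_cons_self ..)
    rw [show nextLE c (d :: t) = if d ≤ c then d else nextLE c t from rfl,
      if_neg (not_le.mpr hd)]
    exact ih (fun e he => h e (List.mem_cons_of_mem _ he))

lemma nextLE_append_right (c : Int) (l m : List Int) (h : ∀ d ∈ l, c < d) :
    nextLE c (l ++ m) = nextLE c m := by
  induction l with
  | nil => rfl
  | cons d t ih =>
    have hd := h d (List.mem_cons_self ..)
    rw [List.cons_append,
      show nextLE c (d :: (t ++ m)) = if d ≤ c then d else nextLE c (t ++ m) from rfl,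
      if_neg (not_le.mpr hd)]
    exact ih (fun e he => h e (List.mem_cons_of_mem _ he))

lemma nextLE_append_left (c : Int) (l m : List Int) (h : ∃ d ∈ l, d ≤ c) :
    nextLE c (l ++ m) = nextLE c l := by
  induction l with
  | nil => obtain ⟨d, hd, _⟩ := h; simp at hd
  | cons d t ih =>
    by_cases hdc : d ≤ c
    · simp [nextLE, if_pos hdc]
    · simp only [List.cons_append, nextLE, if_neg hdc]
      apply ih
      obtain ⟨e, he, hec⟩ := h
      rcases List.mem_cons.mp he with rfl | he'
      · exact absurd hec hdc
      · exact ⟨e, he', hec⟩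

lemma popLoop_spec (costs : List Int) (x : Int) :
    ∀ (stack : List Nat) (res : List Int),
    stack.Pairwise (fun a b => b < a) →
    (∀ j1 j2, j1 ∈ stack → j2 ∈ stack → j1 < j2 → costs.getD j1 0 < costs.getD j2 0) →
    (∀ j, j ∈ stack → j < res.length) →
    (popLoop costs x stack res).1 = stack.filter (fun j => decide (costs.getD j 0 < x)) ∧
    (popLoop costs x stack res).2.length = res.length ∧
    ∀ j', (popLoop costs x stack res).2.getD j' 0
        = res.getD j' 0 - (if j' ∈ stack ∧ x ≤ costs.getD j' 0 then x else 0) := by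
  intro stack
  induction stack with
  | nil =>
    intro res _ _ _
    refine ⟨by simp [popLoop], by simp [popLoop], fun j' => by simp [popLoop]⟩
  | cons j rest ih =>
    intro res hpw hmono hlt
    have hjrest : j ∉ rest := by
      intro hmem
      exact absurd (List.rel_of_pairwise_cons hpw hmem) (by omega)
    by_cases hx : x ≤ costs.getD j 0
    · -- pop j
      simp only [popLoop, if_pos hx]
      set res1 := res.set j (res.getD j 0 - x) with hres1
      have hlen1 : res1.length = res.length := by simp [hres1]
      obtain ⟨h1, h2, h3⟩ := ih res1 (List.Pairwise.of_cons hpw)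
        (fun j1 j2 m1 m2 h => hmono j1 j2 (List.mem_cons_of_mem _ m1) (List.mem_cons_of_mem _ m2) h)
        (fun a ha => by rw [hlen1]; exact hlt a (List.mem_cons_of_mem _ ha))
      refine ⟨?_, by rw [h2, hlen1], ?_⟩
      · rw [h1, List.filter_cons,
          if_neg (by simp only [decide_eq_true_eq]; exact not_lt.mpr hx)]
      · intro j'
        rw [h3 j']
        have hjres : j < res.length := hlt j (List.mem_cons_self ..)
        by_cases hjj : j' = j
        · subst hjj
          have : res1.getD j' 0 = res.getD j' 0 - x := by
            simp [hres1, List.getD_eq_getElem?_getD, List.getElem?_set_self, hjres,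
              List.getElem?_eq_getElem hjres]
          rw [this, if_neg (by simp [hjrest]), if_pos ⟨List.mem_cons_self .., hx⟩]
          ring
        · have : res1.getD j' 0 = res.getD j' 0 := by
            simp [hres1, List.getD_eq_getElem?_getD, List.getElem?_set_ne (fun h => hjj h.symm)]
          rw [this]
          congr 1
          by_cases hr : j' ∈ rest ∧ x ≤ costs.getD j' 0
          · rw [if_pos hr, if_pos ⟨List.mem_cons_of_mem _ hr.1, hr.2⟩]
          · rw [if_neg hr, if_neg (by
              rintro ⟨hm, hxc⟩
              rcases List.mem_cons.mp hm with rfl | hm'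
              · exact hjj rfl
              · exact hr ⟨hm', hxc⟩)]
    · -- stop
      have hploop : popLoop costs x (j :: rest) res = (j :: rest, res) := by
        simp only [popLoop, if_neg hx]
      rw [hploop]
      have hall : ∀ a ∈ j :: rest, costs.getD a 0 < x := by
        intro a ha
        rcases List.mem_cons.mp ha with rfl | ha'
        · omega
        · have haj : a < j := List.rel_of_pairwise_cons hpw ha'
          have := hmono a j (List.mem_cons_of_mem _ ha') (List.mem_cons_self ..) haj
          omega
      refine ⟨?_, rfl, fun j' => ?_⟩
      · exact (List.filter_eq_self.mpr (fun a ha => decide_eq_true (hall a ha))).symm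
      · show res.getD j' 0 = res.getD j' 0 - if j' ∈ j :: rest ∧ x ≤ costs.getD j' 0 then x else 0
        rw [if_neg (by rintro ⟨hm, hxc⟩; exact absurd hxc (by have := hall j' hm; omega))]
        omega

lemma InvA_step (costs : List Int) (i : Nat) (hi : i < costs.length)
    (stack : List Nat) (res : List Int) (h : InvA costs i stack res) :
    InvA costs (i+1) (i :: (popLoop costs (costs.getD i 0) stack res).1)
      ((popLoop costs (costs.getD i 0) stack res).2) := by
  obtain ⟨hile, hlen, hpw, hmem, hres⟩ := h
  set x := costs.getD i 0 with hx
  have hmono : ∀ j1 j2, j1 ∈ stack → j2 ∈ stack → j1 < j2 →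
      costs.getD j1 0 < costs.getD j2 0 := by
    intro j1 j2 m1 m2 hlt'
    obtain ⟨h1lt, h1all⟩ := (hmem j1).mp m1
    obtain ⟨h2lt, _⟩ := (hmem j2).mp m2
    exact h1all _ (seg_elem costs i j1 j2 hlt' h2lt hile)
  have hltlen : ∀ j, j ∈ stack → j < res.length := by
    intro j hj; rw [hlen]; exact lt_of_lt_of_le ((hmem j).mp hj).1 hile
  obtain ⟨hS, hL, hG⟩ := popLoop_spec costs x stack res hpw hmono hltlen
  refine ⟨by omega, by rw [hL, hlen], ?_, ?_, ?_⟩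
  · -- Pairwise on i :: filtered stack
    rw [hS]
    refine List.Pairwise.cons ?_ (hpw.filter _)
    intro a ha
    exact ((hmem a).mp (List.mem_of_mem_filter ha)).1
  · -- membership characterization at i+1
    intro j
    rw [hS]
    simp only [List.mem_cons, List.mem_filter, decide_eq_true_eq]
    constructor
    · rintro (rfl | ⟨hjs, hjx⟩)
      · exact ⟨by omega, by rw [seg_nil costs (j+1) j (by omega)]; simp⟩
      · obtain ⟨hji, hall⟩ := (hmem j).mp hjs
        refine ⟨by omega, ?_⟩
        rw [seg_succ costs i j hji hi]
        intro d hd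
        rcases List.mem_append.mp hd with hd' | hd'
        · exact hall d hd'
        · rw [List.mem_singleton] at hd'; omega
    · rintro ⟨hji1, hall⟩
      by_cases hji : j = i
      · exact Or.inl hji
      · right
        have hjlt : j < i := by omega
        rw [seg_succ costs i j hjlt hi] at hall
        refine ⟨(hmem j).mpr ⟨hjlt, fun d hd => hall d (List.mem_append_left _ hd)⟩, ?_⟩
        have := hall x (List.mem_append_right _ (List.mem_singleton.mpr hx))
        omega
  · -- res characterization at i+1
    intro j hj
    rw [hG j, hres j hj]
    have key : nextLE (costs.getD j 0) (seg costs (i+1) j)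
        = nextLE (costs.getD j 0) (seg costs i j)
          + (if j ∈ stack ∧ x ≤ costs.getD j 0 then x else 0) := by
      by_cases hji : j < i
      · rw [seg_succ costs i j hji hi]
        by_cases hjs : j ∈ stack
        · obtain ⟨_, hall⟩ := (hmem j).mp hjs
          rw [nextLE_append_right _ _ _ hall, nextLE_eq_zero _ _ hall]
          by_cases hxc : x ≤ costs.getD j 0
          · rw [if_pos ⟨hjs, hxc⟩,
              show nextLE (costs.getD j 0) [x] = if x ≤ costs.getD j 0 then x else nextLE (costs.getD j 0) [] from rfl,
              if_pos hxc]
            ring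
          · rw [if_neg (by rintro ⟨_, h⟩; exact hxc h),
              show nextLE (costs.getD j 0) [x] = if x ≤ costs.getD j 0 then x else nextLE (costs.getD j 0) [] from rfl,
              if_neg hxc]
            simp [nextLE]
        · have : ∃ d ∈ seg costs i j, d ≤ costs.getD j 0 := by
            by_contra hno
            push_neg at hno
            exact hjs ((hmem j).mpr ⟨hji, fun d hd => by have := hno d hd; omega⟩)
          rw [nextLE_append_left _ _ _ this, if_neg (by rintro ⟨hc, _⟩; exact hjs hc)]
          omega
      · rw [seg_nil costs (i+1) j (by omega), seg_nil costs i j (by omega)]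
        rw [if_neg (by rintro ⟨hc, _⟩; exact absurd ((hmem j).mp hc).1 hji)]
        simp [nextLE]
    rw [key]
    ring

lemma foldl_InvA (costs : List Int) :
    ∀ (m i : Nat) (st : List Nat × List Int),
      i + m = costs.length → InvA costs i st.1 st.2 →
      InvA costs costs.length
        ((List.range' i m).foldl (stepA costs) st).1
        ((List.range' i m).foldl (stepA costs) st).2 := by
  intro m
  induction m with
  | zero =>
    intro i st hsum hinv
    simpa [List.range'] using (by rw [show i = costs.length by omega] at hinv; exact hinv)
  | succ m ih =>
    intro i st hsum hinv
    rw [List.range'_succ, List.foldl_cons]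
    exact ih (i+1) _ (by omega)
      (by have := InvA_step costs i (by omega) st.1 st.2 hinv; exact this)

lemma InvA_init (costs : List Int) : InvA costs 0 [] costs := by
  refine ⟨by omega, rfl, List.Pairwise.nil, fun j => ?_, fun j hj => ?_⟩
  · simp
  · rw [seg_nil costs 0 j (by omega)]
    simp [nextLE]

lemma final_eq (costs : List Int) :
    (final_supply_costs costs).length = costs.length ∧
    ∀ j, j < costs.length →
      (final_supply_costs costs).getD j 0
        = costs.getD j 0 - nextLE (costs.getD j 0) (costs.drop (j+1)) := by
  have h := foldl_InvA costs costs.length 0 ([], costs) (by omega) (InvA_init costs)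
  rw [← List.range_eq_range'] at h
  obtain ⟨_, hlen, _, _, hres⟩ := h
  refine ⟨hlen, fun j hj => ?_⟩
  have := hres j hj
  rwa [show seg costs costs.length j = costs.drop (j+1) by unfold seg; rw [List.take_length]] at this

lemma alt_eq (costs : List Int) :
    final_supply_costs_alt costs
      = (List.range costs.length).map
          (fun j => costs.getD j 0 - nextLE (costs.getD j 0) (costs.drop (j+1))) := by
  unfold final_supply_costs_alt
  rw [PySem.List.enumerate_eq_map_pyRange costs 0, PySem.List.pyRange_one]
  rw [List.map_map, List.map_map]
  apply List.map_congr_left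
  intro k hk
  simp only [Function.comp]
  have h1 : PySem.List.pyGetD costs ((0:Int) + k) 0 = costs.getD k 0 := by
    rw [show (0:Int) + k = ((k:Nat):Int) by push_cast; ring]
    simp [PySem.List.pyGetD_natCast]
  have h2 : PySem.List.slice costs (some ((0:Int) + k + 1)) none = costs.drop (k+1) := by
    rw [show (0:Int) + k + 1 = (((k+1:Nat)):Int) by push_cast; ring]
    rw [PySem.List.slice_from_natCast]
  rw [h1, h2]

-- ===== VERDICT (by name: the statement is the Claim_ definition above) =====
theorem final_supply_costs_spec : Claim_equal_final_supply_costs := by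
  intro costs _
  unfold Spec_final_supply_costs
  obtain ⟨hlen, hget⟩ := final_eq costs
  rw [alt_eq costs]
  apply List.ext_getElem
  · simp [hlen]
  · intro j h1 h2
    have hj : j < costs.length := by simpa using h2
    have := hget j hj
    rw [List.getD_eq_getElem _ 0 h1] at this
    rw [this]
    simp
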